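-- pv_equiv track=rewrite | github.com/pypi-data/pypi-mirror-403 | packages/hyper2kvm/hyper2kvm-0.2.0.tar.gz/hyper2kvm-0.2.0/hyper2kvm/core/vmcraft/enhanced_inspection.py | _parse_systemd_resolved_content
-- ===== SOURCE A (Python) =====
-- def _parse_systemd_resolved_content(content: str) -> dict[str, list[str]]:
--     """
--     Parse systemd resolved.conf content for DNS servers.
--
--     Returns:
--         Dict with 'dns' and 'fallback_dns' lists
--     """
--     parsed = {
--         "dns": [],
--         "fallback_dns": [],
--     }
--     current_section = ""
--
--     for line in content.splitlines():
--         line = line.strip()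
--         if not line or line.startswith(('#', ';')):
--             continue
--
--         if line.startswith('[') and line.endswith(']'):
--             current_section = line[1:-1]
--             continue
--
--         if current_section == "Resolve" and '=' in line:
--             key, value = line.split('=', 1)
--             key = key.strip()
--             value = value.strip()
--
--             if key == "DNS":
--                 for server in value.split():
--                     # Extract IP, ignoring port/interface/SNI
--                     ip = server.split(':')[0].split('%')[0].split('#')[0]
--                     if ip:
--                         parsed["dns"].append(ip)
--
--             elif key == "FallbackDNS":
--                 for server in value.split():
--                     # Extract IP, ignoring port/interface/SNI
--                     ip = server.split(':')[0].split('%')[0].split('#')[0]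
--                     if ip:
--                         parsed["fallback_dns"].append(ip)
--
--     return parsed
-- ===== SOURCE B (Python) =====
-- def _parse_systemd_resolved_content(content: str) -> dict[str, list[str]]:
--     """Two-phase variant: annotate content lines with their section, then build each
--     output list by an independent comprehension pass keyed on the wanted option name;
--     IPs are cut with a character scan instead of a split chain."""
--     annotated = []
--     section = ""
--     for raw in content.splitlines():
--         line = raw.strip()
--         if not line or line.startswith(('#', ';')):
--             continue
--         if line.startswith('[') and line.endswith(']'):
--             section = line[1:-1]
--         else:
--             annotated.append((section, line))
--
--     def cut(server):
--         ip = ""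
--         for c in server:
--             if c in ":%#":
--                 break
--             ip += c
--         return ip
--
--     def ips_for(wanted):
--         return [ip
--                 for sec, line in annotated
--                 if sec == "Resolve" and '=' in line
--                 for key, value in [line.split('=', 1)]
--                 if key.strip() == wanted
--                 for ip in map(cut, value.strip().split())
--                 if ip]
--
--     return {"dns": ips_for("DNS"), "fallback_dns": ips_for("FallbackDNS")}
-- ===== Notes on version B (the rewrite author's own statement) =====
-- stated objective: alternative
-- what changed: Replaces A's single stateful loop by two phases (annotate each content line with its section, then one independent comprehension pass per option name) and replaces A's chained three-way split for extracting the IP by a single character scan that stops at the first separator character.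
import Mathlib
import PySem

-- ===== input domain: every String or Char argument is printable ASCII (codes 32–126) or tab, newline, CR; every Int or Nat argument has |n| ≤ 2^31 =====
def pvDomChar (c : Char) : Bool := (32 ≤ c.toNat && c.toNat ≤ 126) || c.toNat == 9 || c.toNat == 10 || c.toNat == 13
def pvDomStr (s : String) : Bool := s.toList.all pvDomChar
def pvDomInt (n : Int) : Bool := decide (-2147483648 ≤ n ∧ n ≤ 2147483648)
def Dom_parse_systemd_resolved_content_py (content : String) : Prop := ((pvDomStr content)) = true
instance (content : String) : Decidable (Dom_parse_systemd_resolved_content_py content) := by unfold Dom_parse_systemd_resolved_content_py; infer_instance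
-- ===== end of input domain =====

-- B replaces A's single stateful loop by two phases (section-annotated lines, then one comprehension pass per option name) and the split-chain by a character scan; same cost, alternative decomposition.

-- ===== PORT A =====
-- ip = server.split(':')[0].split('%')[0].split('#')[0]
def pvFirst (o : Option (List String)) : String := (o.getD []).headD ""
def pvIpOf (server : String) : String :=
  pvFirst (PySem.Str.split? (pvFirst (PySem.Str.split? (pvFirst (PySem.Str.split? server ":")) "%")) "#")

def pvStepA (st : String × List String × List String) (raw : String) : String × List String × List String :=
  let line := PySem.Str.strip raw
  if line == "" || PySem.Str.startswith line "#" || PySem.Str.startswith line ";" then st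
  else if PySem.Str.startswith line "[" && PySem.Str.endswith line "]" then
    (PySem.Str.slice line (some 1) (some (-1)), st.2.1, st.2.2)
  else if st.1 == "Resolve" && PySem.Str.isIn "=" line then
    match PySem.Str.splitMax? line "=" 1 with
    | some (k :: v :: _) =>
      let key := PySem.Str.strip k
      let value := PySem.Str.strip v
      if key == "DNS" then
        (st.1,
         (PySem.Str.split₀ value).foldl (fun acc server =>
            let ip := pvIpOf server
            if ip ≠ "" then acc ++ [ip] else acc) st.2.1,
         st.2.2)
      else if key == "FallbackDNS" then
        (st.1, st.2.1,
         (PySem.Str.split₀ value).foldl (fun acc server =>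
            let ip := pvIpOf server
            if ip ≠ "" then acc ++ [ip] else acc) st.2.2)
      else st
    | _ => st
  else st

def parse_systemd_resolved_content_py (content : String) : List (String × List String) :=
  let st := (PySem.Str.splitlines content).foldl pvStepA ("", [], [])
  [("dns", st.2.1), ("fallback_dns", st.2.2)]

-- ===== PORT B =====
-- phase 1: annotated.append((section, line)) for non-comment, non-header lines
def pvAnnotStep (st : List (String × String) × String) (raw : String) :
    List (String × String) × String :=
  let line := PySem.Str.strip raw
  if line == "" || PySem.Str.startswith line "#" || PySem.Str.startswith line ";" then st
  else if PySem.Str.startswith line "[" && PySem.Str.endswith line "]" then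
    (st.1, PySem.Str.slice line (some 1) (some (-1)))
  else (st.1 ++ [(st.2, line)], st.2)

-- cut(server): character scan, stop at the first of ':', '%', '#'
def pvCut (server : String) : String :=
  String.ofList (server.toList.takeWhile (fun c => !(c == ':' || c == '%' || c == '#')))

-- the IPs one annotated Resolve line contributes for option name `wanted`
def pvPiece (wanted line : String) : List String :=
  match PySem.Str.splitMax? line "=" 1 with
  | some (k :: v :: _) =>
    if PySem.Str.strip k == wanted then
      ((PySem.Str.split₀ (PySem.Str.strip v)).map pvCut).filter (fun ip => ip ≠ "")
    else []
  | _ => []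

-- ips_for(wanted): one comprehension pass over the annotated lines
def pvIpsFor (wanted : String) (annotated : List (String × String)) : List String :=
  annotated.flatMap (fun p =>
    if p.1 == "Resolve" && PySem.Str.isIn "=" p.2 then pvPiece wanted p.2 else [])

def parse_systemd_resolved_content_py_alt (content : String) : List (String × List String) :=
  let annotated := ((PySem.Str.splitlines content).foldl pvAnnotStep ([], "")).1
  [("dns", pvIpsFor "DNS" annotated), ("fallback_dns", pvIpsFor "FallbackDNS" annotated)]

-- ===== PRECONDITION & SPEC =====
def Spec_parse_systemd_resolved_content_py (content : String) (out : List (String × List String)) : Prop := out = parse_systemd_resolved_content_py_alt content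
instance (content : String) (out : List (String × List String)) : Decidable (Spec_parse_systemd_resolved_content_py content out) := by unfold Spec_parse_systemd_resolved_content_py; infer_instance

-- ===== CLAIM (what is proved, stated in full; the proofs are below) =====
def Claim_equal_parse_systemd_resolved_content_py : Prop := ∀ (content : String), Dom_parse_systemd_resolved_content_py content → Spec_parse_systemd_resolved_content_py content (parse_systemd_resolved_content_py content)

-- ===== LEMMAS AND PROOFS =====

-- A's split chain equals B's character scan: first element of a single-char split is a takeWhile
lemma pv_go_acc (sep : List Char) (fuel : Nat) (l cur : List Char) (acc : List (List Char)) :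
    PySem.Chars.splitOn.go sep fuel l cur acc
      = acc.reverse ++ PySem.Chars.splitOn.go sep fuel l cur [] := by
  induction fuel generalizing l cur acc with
  | zero => simp [PySem.Chars.splitOn.go]
  | succ n ih =>
    cases l with
    | nil => simp [PySem.Chars.splitOn.go]
    | cons c rest =>
      simp only [PySem.Chars.splitOn.go]
      by_cases h : sep.isPrefixOf (c :: rest) = true
      · simp only [if_pos h]
        rw [ih _ _ (cur.reverse :: acc), ih _ _ [cur.reverse]]
        simp
      · simp only [if_neg h]
        exact ih _ _ acc

lemma pv_go_head (d : Char) (fuel : Nat) (l cur : List Char) (h : l.length < fuel) :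
    ∃ tl, PySem.Chars.splitOn.go [d] fuel l cur []
      = (cur.reverse ++ l.takeWhile (fun c => !(c == d))) :: tl := by
  induction fuel generalizing l cur with
  | zero => omega
  | succ n ih =>
    cases l with
    | nil => exact ⟨[], by simp [PySem.Chars.splitOn.go]⟩
    | cons c rest =>
      simp only [PySem.Chars.splitOn.go]
      by_cases hp : List.isPrefixOf [d] (c :: rest) = true
      · have hc : c = d := by
          simp [List.isPrefixOf] at hp; exact hp.symm
        refine ⟨PySem.Chars.splitOn.go [d] n (List.drop 1 (c :: rest)) [] [], ?_⟩
        simp only [if_pos hp]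
        rw [pv_go_acc]
        subst hc
        simp
      · have hc : ¬ (c = d) := by
          intro hcd; subst hcd; simp [List.isPrefixOf] at hp
        simp only [if_neg hp]
        obtain ⟨tl, htl⟩ := ih rest (c :: cur) (by simpa using Nat.lt_of_succ_lt_succ h)
        refine ⟨tl, ?_⟩
        rw [htl]
        simp [hc]

lemma pv_first_split (s : String) (d : Char) :
    pvFirst (PySem.Str.split? s (String.ofList [d]))
      = String.ofList (s.toList.takeWhile (fun c => !(c == d))) := by
  obtain ⟨tl, htl⟩ := pv_go_head d (s.toList.length + 1) s.toList [] (by omega)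
  simp only [pvFirst, PySem.Str.split?, PySem.Chars.split?, String.toList_ofList,
    List.isEmpty_cons, Bool.false_eq_true, if_false, Option.map_some, Option.getD_some,
    PySem.Chars.splitOn, htl]
  simp

lemma pv_ip_eq (s : String) : pvIpOf s = pvCut s := by
  unfold pvIpOf pvCut
  rw [show (":" : String) = String.ofList [':'] from rfl,
      show ("%" : String) = String.ofList ['%'] from rfl,
      show ("#" : String) = String.ofList ['#'] from rfl,
      pv_first_split, pv_first_split, pv_first_split]
  simp only [String.toList_ofList, List.takeWhile_takeWhile]
  congr 1
  refine congrFun (congrArg List.takeWhile (funext fun c => ?_)) s.toList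
  by_cases h1 : c = ':' <;> by_cases h2 : c = '%' <;> by_cases h3 : c = '#' <;>
    simp [h1, h2, h3]

-- the section-annotated content lines starting from section `cur` (spec of B's phase 1)
def pvAnnot : List String → String → List (String × String)
  | [], _ => []
  | raw :: rest, cur =>
    let line := PySem.Str.strip raw
    if line == "" || PySem.Str.startswith line "#" || PySem.Str.startswith line ";" then
      pvAnnot rest cur
    else if PySem.Str.startswith line "[" && PySem.Str.endswith line "]" then
      pvAnnot rest (PySem.Str.slice line (some 1) (some (-1)))
    else (cur, line) :: pvAnnot rest cur

lemma pvAnnot_spec (lines : List String) (acc : List (String × String)) (cur : String) :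
    (lines.foldl pvAnnotStep (acc, cur)).1 = acc ++ pvAnnot lines cur := by
  induction lines generalizing acc cur with
  | nil => simp [pvAnnot]
  | cons raw rest ih =>
    simp only [List.foldl_cons, pvAnnotStep, pvAnnot]
    by_cases h1 : (PySem.Str.strip raw == "" || PySem.Str.startswith (PySem.Str.strip raw) "#" ||
        PySem.Str.startswith (PySem.Str.strip raw) ";") = true
    · simp only [if_pos h1]; exact ih acc cur
    · simp only [if_neg h1]
      by_cases h2 : (PySem.Str.startswith (PySem.Str.strip raw) "[" &&
          PySem.Str.endswith (PySem.Str.strip raw) "]") = true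
      · simp only [if_pos h2]; exact ih acc _
      · simp only [if_neg h2]; rw [ih]; simp

lemma pvPiece_none (w line : String) (h : PySem.Str.splitMax? line "=" 1 = none) :
    pvPiece w line = [] := by
  unfold pvPiece; rw [h]

lemma pvPiece_short (w line : String) (h : ∃ tl, PySem.Str.splitMax? line "=" 1 = some tl ∧ (tl = [] ∨ ∃ k, tl = [k])) :
    pvPiece w line = [] := by
  obtain ⟨tl, h1, h2⟩ := h
  unfold pvPiece; rw [h1]
  rcases h2 with rfl | ⟨k, rfl⟩ <;> rfl

lemma pvPiece_cons2 (w line k v : String) (tl : List String)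
    (h : PySem.Str.splitMax? line "=" 1 = some (k :: v :: tl)) :
    pvPiece w line
      = if PySem.Str.strip k == w then
          ((PySem.Str.split₀ (PySem.Str.strip v)).map pvCut).filter (fun ip => ip ≠ "")
        else [] := by
  unfold pvPiece; rw [h]

lemma pvIpsFor_cons (w : String) (q : String × String) (rest : List (String × String)) :
    pvIpsFor w (q :: rest)
      = (if q.1 == "Resolve" && PySem.Str.isIn "=" q.2 then pvPiece w q.2 else [])
        ++ pvIpsFor w rest := by
  simp [pvIpsFor]

lemma pv_fold_eq (l : List String) (init : List String) :
    l.foldl (fun acc server => if pvIpOf server = "" then acc else acc ++ [pvIpOf server]) init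
      = init ++ (l.map pvCut).filter (fun ip => !decide (ip = "")) := by
  induction l generalizing init with
  | nil => simp
  | cons s l ih =>
    simp only [List.foldl_cons, List.map_cons, List.filter_cons]
    rw [ih]
    by_cases h : pvCut s = "" <;> simp [pv_ip_eq, h, List.append_assoc]

lemma pvFoldA_spec (lines : List String) (cur : String) (d f : List String) :
    (lines.foldl pvStepA (cur, d, f)).2
      = (d ++ pvIpsFor "DNS" (pvAnnot lines cur), f ++ pvIpsFor "FallbackDNS" (pvAnnot lines cur)) := by
  induction lines generalizing cur d f with
  | nil => simp [pvAnnot, pvIpsFor]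
  | cons raw rest ih =>
    simp only [List.foldl_cons, pvStepA, pvAnnot]
    by_cases h1 : (PySem.Str.strip raw == "" || PySem.Str.startswith (PySem.Str.strip raw) "#" ||
        PySem.Str.startswith (PySem.Str.strip raw) ";") = true
    · simp only [if_pos h1]; exact ih cur d f
    · simp only [if_neg h1]
      by_cases h2 : (PySem.Str.startswith (PySem.Str.strip raw) "[" &&
          PySem.Str.endswith (PySem.Str.strip raw) "]") = true
      · simp only [if_pos h2]; exact ih _ d f
      · simp only [if_neg h2]
        rw [pvIpsFor_cons, pvIpsFor_cons]
        by_cases hcur : cur = "Resolve"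
        · subst hcur
          by_cases hin : PySem.Str.isIn "=" (PySem.Str.strip raw) = true
          · have hco : ("Resolve" == "Resolve" && PySem.Str.isIn "=" (PySem.Str.strip raw)) = true := by
              rw [hin, Bool.and_true]; rfl
            simp only [if_pos hco]
            cases hsp : PySem.Str.splitMax? (PySem.Str.strip raw) "=" 1 with
            | none =>
              rw [pvPiece_none _ _ hsp, pvPiece_none _ _ hsp]
              simp only [List.nil_append]
              exact ih "Resolve" d f
            | some parts =>
              match parts with
              | [] =>
                rw [pvPiece_short _ _ ⟨[], hsp, Or.inl rfl⟩, pvPiece_short _ _ ⟨[], hsp, Or.inl rfl⟩]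
                simp only [List.nil_append]
                exact ih "Resolve" d f
              | [k] =>
                rw [pvPiece_short _ _ ⟨[k], hsp, Or.inr ⟨k, rfl⟩⟩,
                    pvPiece_short _ _ ⟨[k], hsp, Or.inr ⟨k, rfl⟩⟩]
                simp only [List.nil_append]
                exact ih "Resolve" d f
              | k :: v :: tl2 =>
                rw [pvPiece_cons2 _ _ _ _ _ hsp, pvPiece_cons2 _ _ _ _ _ hsp]
                by_cases hk : PySem.Str.strip k = "DNS"
                · simp [hk, ih, pv_fold_eq, List.append_assoc]
                · by_cases hk2 : PySem.Str.strip k = "FallbackDNS"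
                  · simp [hk2, ih, pv_fold_eq, List.append_assoc]
                  · simp [hk, hk2, ih]
          · have hb : PySem.Str.isIn "=" (PySem.Str.strip raw) = false := Bool.eq_false_iff.mpr hin
            have hco : ("Resolve" == "Resolve" && PySem.Str.isIn "=" (PySem.Str.strip raw)) = false := by
              rw [hb, Bool.and_false]
            simp only [hco, Bool.false_eq_true, if_false, List.nil_append]
            exact ih "Resolve" d f
        · have hco : (cur == "Resolve" && PySem.Str.isIn "=" (PySem.Str.strip raw)) = false := by
            simp [hcur]
          simp only [hco, Bool.false_eq_true, if_false, List.nil_append]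
          exact ih cur d f

-- ===== VERDICT (by name: the statement is the Claim_ definition above) =====
theorem parse_systemd_resolved_content_py_spec : Claim_equal_parse_systemd_resolved_content_py := by
  intro content _
  unfold Spec_parse_systemd_resolved_content_py
  unfold parse_systemd_resolved_content_py parse_systemd_resolved_content_py_alt
  simp only []
  rw [pvAnnot_spec, pvFoldA_spec]
  simp
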